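-- pv_equiv track=rewrite | github.com/ZHQI-China/PytorchProjs | 00.XuanHuanNameGenerator/src/auto_research/prepare.py | is_valid_sample
-- ===== SOURCE A (Python) =====
-- INITIALS = {
--     "_", "b", "p", "m", "f", "d", "t", "n", "l", "g", "k", "h",
--     "j", "q", "x", "r", "z", "c", "s", "y", "w", "zh", "ch", "sh",
-- }
--
-- FINALS = {
--     "a", "o", "e", "i", "u", "v",
--     "ai", "ei", "ui", "ao", "ou", "iu", "ie", "ue", "er",
--     "an", "en", "in", "un", "vn",
--     "ang", "eng", "ing", "ong",
--     "ia", "iao", "ian", "iang", "iong",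
--     "ua", "uo", "uai", "uan", "uang",
-- }
--
-- def is_valid_sample(tokens: list[str]) -> bool:
--     if tokens.count("|") != 1:
--         return False
--     sep = tokens.index("|")
--     if sep == 0 or sep == len(tokens) - 1:
--         return False
--     parts = tokens[:sep] + tokens[sep + 1:]
--     if len(parts) % 2 != 0:
--         return False
--     for i in range(0, len(parts), 2):
--         if parts[i] not in INITIALS or parts[i + 1] not in FINALS:
--             return False
--     return True
-- ===== SOURCE B (Python) =====
-- INITIALS = {
--     "_", "b", "p", "m", "f", "d", "t", "n", "l", "g", "k", "h",
--     "j", "q", "x", "r", "z", "c", "s", "y", "w", "zh", "ch", "sh",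
-- }
--
-- FINALS = {
--     "a", "o", "e", "i", "u", "v",
--     "ai", "ei", "ui", "ao", "ou", "iu", "ie", "ue", "er",
--     "an", "en", "in", "un", "vn",
--     "ang", "eng", "ing", "ong",
--     "ia", "iao", "ian", "iang", "iong",
--     "ua", "uo", "uai", "uan", "uang",
-- }
--
-- def is_valid_sample(tokens: list[str]) -> bool:
--     # Single pass: no parts list, no .count/.index/slicing.
--     j = 0          # number of non-separator tokens seen so far
--     seps = 0       # number of '|' seen
--     sep_idx = -1   # index of the last '|' seen
--     for idx, t in enumerate(tokens):
--         if t == "|":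
--             seps += 1
--             sep_idx = idx
--         else:
--             if t not in (INITIALS if j % 2 == 0 else FINALS):
--                 return False
--             j += 1
--     return seps == 1 and 0 < sep_idx < len(tokens) - 1 and j % 2 == 0
-- ===== Notes on version B (the rewrite author's own statement) =====
-- stated objective: faster
-- what changed: Replaces A's count/index/slice-and-concatenate plus pair-indexed loop with one fused pass that keeps a parity counter for non-separator tokens and the separator's count and index, validating tokens in place.
import Mathlib
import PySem

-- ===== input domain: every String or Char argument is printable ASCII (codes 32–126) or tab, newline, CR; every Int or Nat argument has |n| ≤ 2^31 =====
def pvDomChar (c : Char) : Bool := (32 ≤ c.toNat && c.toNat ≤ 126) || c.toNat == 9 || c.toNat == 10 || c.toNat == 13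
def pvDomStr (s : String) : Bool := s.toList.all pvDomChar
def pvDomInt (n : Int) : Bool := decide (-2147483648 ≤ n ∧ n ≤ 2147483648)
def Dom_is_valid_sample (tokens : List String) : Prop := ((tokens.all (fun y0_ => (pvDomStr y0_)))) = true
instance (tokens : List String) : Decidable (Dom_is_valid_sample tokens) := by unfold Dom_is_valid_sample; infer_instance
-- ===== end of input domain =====

-- B fuses A's count/index/slice passes into one loop with a parity counter (objective: faster, constant-factor).

-- ===== PORT A =====
def pvINITIALS : PySem.Set String := PySem.Set.ofList
  ["_", "b", "p", "m", "f", "d", "t", "n", "l", "g", "k", "h",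
   "j", "q", "x", "r", "z", "c", "s", "y", "w", "zh", "ch", "sh"]

def pvFINALS : PySem.Set String := PySem.Set.ofList
  ["a", "o", "e", "i", "u", "v",
   "ai", "ei", "ui", "ao", "ou", "iu", "ie", "ue", "er",
   "an", "en", "in", "un", "vn",
   "ang", "eng", "ing", "ong",
   "ia", "iao", "ian", "iang", "iong",
   "ua", "uo", "uai", "uan", "uang"]

-- A's 'for i in range(0, len(parts), 2)' loop with its early return, as recursion over the range list.
def pvALoop (parts : List String) : List Int → Bool
  | [] => true
  | i :: is =>
    match PySem.List.pyGet? parts i, PySem.List.pyGet? parts (i + 1) with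
    | some x, some y =>
      if ¬ (PySem.Set.contains pvINITIALS x) ∨ ¬ (PySem.Set.contains pvFINALS y) then false
      else pvALoop parts is
    | _, _ => false  -- unreachable: both indices are in range under the even-length guard

def is_valid_sample (tokens : List String) : Bool :=
  if PySem.List.count tokens "|" ≠ 1 then false
  else
    match PySem.List.index? tokens "|" with
    | none => false  -- unreachable: count = 1 means "|" ∈ tokens
    | some sep =>
      if sep = 0 ∨ sep = tokens.length - 1 then false
      else
        let parts := PySem.List.slice tokens none (some (sep : Int)) ++
                     PySem.List.slice tokens (some ((sep : Int) + 1)) none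
        if parts.length % 2 ≠ 0 then false
        else pvALoop parts (PySem.List.pyRange 0 parts.length 2)

-- ===== PORT B =====
-- B's single pass: j = non-separator tokens seen, seps = '|' count, sepIdx = index of last '|'.
def pvBGo (n : Int) : List String → Int → Nat → Nat → Int → Bool
  | [], _, j, seps, sepIdx =>
      seps == 1 && (0 < sepIdx && sepIdx < n - 1) && j % 2 == 0
  | t :: ts, idx, j, seps, sepIdx =>
      if t == "|" then pvBGo n ts (idx + 1) j (seps + 1) idx
      else if (if j % 2 == 0 then PySem.Set.contains pvINITIALS t
               else PySem.Set.contains pvFINALS t) then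
        pvBGo n ts (idx + 1) (j + 1) seps sepIdx
      else false

def is_valid_sample_alt (tokens : List String) : Bool :=
  pvBGo (tokens.length : Int) tokens 0 0 0 (-1)

-- ===== PRECONDITION & SPEC =====
def Spec_is_valid_sample (tokens : List String) (out : Bool) : Prop := out = is_valid_sample_alt tokens
instance (tokens : List String) (out : Bool) : Decidable (Spec_is_valid_sample tokens out) := by unfold Spec_is_valid_sample; infer_instance

-- ===== CLAIM (what is proved, stated in full; the proofs are below) =====
def Claim_equal_is_valid_sample : Prop := ∀ (tokens : List String), Dom_is_valid_sample tokens → Spec_is_valid_sample tokens (is_valid_sample tokens)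

-- ===== LEMMAS AND PROOFS =====

-- alternating checker: the common semantics of A's pair loop and B's parity pass
def pvChk : List String → Nat → Bool
  | [], _ => true
  | t :: ts, j =>
      (if j % 2 == 0 then PySem.Set.contains pvINITIALS t
       else PySem.Set.contains pvFINALS t) && pvChk ts (j + 1)

def pvPairChk : List String → Bool
  | [] => true
  | [_] => true
  | x :: y :: rest =>
      PySem.Set.contains pvINITIALS x && PySem.Set.contains pvFINALS y && pvPairChk rest

lemma pvChk_append (l r : List String) (j : Nat) :
    pvChk (l ++ r) j = (pvChk l j && pvChk r (j + l.length)) := by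
  induction l generalizing j with
  | nil => simp [pvChk]
  | cons t ts ih =>
      simp only [List.cons_append, pvChk, ih, List.length_cons, Bool.and_assoc]
      have : j + 1 + ts.length = j + (ts.length + 1) := by omega
      rw [this]

lemma pvChk_even (parts : List String) (hlen : parts.length % 2 = 0) :
    ∀ j : Nat, j % 2 = 0 → pvChk parts j = pvPairChk parts := by
  fun_induction pvPairChk parts with
  | case1 => intro j _; simp [pvChk]
  | case2 x => simp at hlen
  | case3 x y rest ih =>
      intro j hj
      have hl : rest.length % 2 = 0 := by simp at hlen; omega
      have h1 : (j + 1) % 2 ≠ 0 := by omega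
      have h2 : (j + 1 + 1) % 2 = 0 := by omega
      simp only [pvChk]
      rw [if_pos (by simpa using hj), if_neg (by simpa using h1), ih hl (j + 1 + 1) h2,
        Bool.and_assoc]

lemma pvRange_two_cons (a b : Int) (h : a < b) :
    PySem.List.pyRange a b 2 = a :: PySem.List.pyRange (a + 2) b 2 := by
  rw [PySem.List.pyRange_of_pos _ _ (by norm_num), PySem.List.pyRange_of_pos _ _ (by norm_num)]
  by_cases h2 : a + 2 < b
  · rw [if_pos h, if_pos h2]
    have : ((b - a + 2 - 1) / 2).toNat = ((b - (a + 2) + 2 - 1) / 2).toNat + 1 := by omega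
    rw [this, List.range_succ_eq_map]
    simp only [List.map_cons, List.map_map]
    congr 1
    · push_cast; ring
    · apply List.map_congr_left
      intro k _
      simp only [Function.comp_apply]
      push_cast; ring
  · rw [if_pos h, if_neg h2]
    have he : ((b - a + 2 - 1) / 2).toNat = 1 := by omega
    rw [he]
    norm_num [List.range_succ]

-- A's pair loop over absolute indices equals the pair checker, for any even-length tail
lemma pvALoop_eq (parts : List String) (hlen : parts.length % 2 = 0) :
    ∀ pre : List String, pvALoop (pre ++ parts) (PySem.List.pyRange (pre.length : Int)
      ((pre.length : Int) + (parts.length : Int)) 2) = pvPairChk parts := by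
  fun_induction pvPairChk parts with
  | case1 => intro pre; simp [pvALoop, PySem.List.pyRange_of_pos]
  | case2 x => simp at hlen
  | case3 x y rest ih =>
      intro pre
      have hx : PySem.List.pyGet? (pre ++ x :: y :: rest) (pre.length : Int) = some x :=
        PySem.List.pyGet?_append_length pre _ x
      have hy : PySem.List.pyGet? (pre ++ x :: y :: rest) ((pre.length : Int) + 1) = some y := by
        have := PySem.List.pyGet?_append_right pre (x :: y :: rest) 1
        simpa using this
      have hcons : PySem.List.pyRange (pre.length : Int)
          ((pre.length : Int) + ((x :: y :: rest).length : Int)) 2 =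
          (pre.length : Int) :: PySem.List.pyRange ((pre.length : Int) + 2)
            ((pre.length : Int) + ((x :: y :: rest).length : Int)) 2 := by
        apply pvRange_two_cons
        have : (0 : Int) < ((x :: y :: rest).length : Int) := by
          exact_mod_cast Nat.succ_pos (y :: rest).length
        omega
      rw [hcons]
      simp only [pvALoop, hx, hy]
      by_cases hix : PySem.Set.contains pvINITIALS x = true
      · by_cases hiy : PySem.Set.contains pvFINALS y = true
        · rw [if_neg (by rw [hix, hiy]; simp)]
          have hrlen : rest.length % 2 = 0 := by simp at hlen; omega
          have e1 : (pre.length : Int) + 2 = ((pre ++ [x, y]).length : Int) := by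
            push_cast [List.length_append, List.length_cons, List.length_nil]; ring
          have e2 : (pre.length : Int) + ((x :: y :: rest).length : Int) =
              ((pre ++ [x, y]).length : Int) + (rest.length : Int) := by
            push_cast [List.length_append, List.length_cons, List.length_nil]; ring
          have e3 : pre ++ x :: y :: rest = (pre ++ [x, y]) ++ rest := by simp
          rw [e1, e2, e3, ih hrlen (pre ++ [x, y]), hix, hiy]
          simp only [Bool.true_and]
        · rw [if_pos (Or.inr hiy)]
          simp only [Bool.not_eq_true] at hiy
          rw [hiy]
          simp only [Bool.and_false, Bool.false_and]
      · rw [if_pos (Or.inl hix)]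
        simp only [Bool.not_eq_true] at hix
        rw [hix]
        simp only [Bool.false_and]

-- B's loop returns false whenever the separators seen plus those remaining are not exactly one
lemma pvBGo_seps_ne (n : Int) (ts : List String) (idx : Int) (j seps : Nat) (sepIdx : Int)
    (h : seps + List.count "|" ts ≠ 1) : pvBGo n ts idx j seps sepIdx = false := by
  induction ts generalizing idx j seps sepIdx with
  | nil =>
      rw [List.count_nil] at h
      simp only [pvBGo]
      have : (seps == 1) = false := by simpa using (by omega : seps ≠ 1)
      simp [this]
  | cons t ts ih =>
      by_cases ht : t = "|"
      · subst ht
        simp only [pvBGo]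
        rw [if_pos (by simp)]
        apply ih
        rw [List.count_cons_self] at h
        omega
      · simp only [pvBGo]
        rw [if_neg (by simpa using ht)]
        have h' : seps + List.count "|" ts ≠ 1 := by
          rw [List.count_cons_of_ne (by simpa using ht)] at h
          exact h
        split <;> split
        · exact ih _ _ _ _ h'
        · rfl
        · exact ih _ _ _ _ h'
        · rfl

-- B's loop over a separator-free prefix splits into the alternating check and the rest
lemma pvBGo_free (n : Int) (l : List String) (rest : List String) (hl : "|" ∉ l) :
    ∀ (idx : Int) (j : Nat) (seps : Nat) (sepIdx : Int),
    pvBGo n (l ++ rest) idx j seps sepIdx =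
      (pvChk l j && pvBGo n rest (idx + l.length) (j + l.length) seps sepIdx) := by
  induction l with
  | nil => intro idx j seps sepIdx; simp [pvChk]
  | cons t ts ih =>
      intro idx j seps sepIdx
      have ht : t ≠ "|" := fun h => hl (h ▸ List.mem_cons_self)
      have hts : "|" ∉ ts := fun h => hl (List.mem_cons_of_mem _ h)
      simp only [List.cons_append, pvBGo, pvChk]
      rw [if_neg (by simpa using ht)]
      by_cases hc : (if j % 2 == 0 then PySem.Set.contains pvINITIALS t
                     else PySem.Set.contains pvFINALS t) = true
      · rw [if_pos hc, hc, ih hts (idx + 1) (j + 1) seps sepIdx, Bool.true_and]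
        have e1 : idx + 1 + (ts.length : Int) = idx + ((t :: ts).length : Int) := by
          push_cast [List.length_cons]; ring
        have e2 : j + 1 + ts.length = j + (t :: ts).length := by
          rw [List.length_cons]; omega
        rw [e1, e2]
      · rw [if_neg hc]
        rw [Bool.not_eq_true] at hc
        rw [hc]
        simp only [Bool.false_and]

lemma count_eq_one_split (xs : List String) (h : List.count "|" xs = 1) :
    ∃ l r, xs = l ++ "|" :: r ∧ "|" ∉ l ∧ "|" ∉ r := by
  induction xs with
  | nil => simp at h
  | cons x xs ih =>
      by_cases hx : x = "|"
      · subst hx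
        refine ⟨[], xs, rfl, by simp, ?_⟩
        rw [List.count_cons_self] at h
        exact fun hm => by
          have := List.count_pos_iff.mpr hm
          omega
      · obtain ⟨l, r, hsplit, hl, hr⟩ :=
          ih (by rwa [List.count_cons_of_ne (by simpa using hx)] at h)
        exact ⟨x :: l, r, by simp [hsplit], by
          intro hm
          rcases List.mem_cons.mp hm with h1 | h1
          · exact hx h1.symm
          · exact hl h1, hr⟩

-- evaluate B on a decomposed input
lemma pvB_eval (l r : List String) (hl : "|" ∉ l) (hr : "|" ∉ r) :
    is_valid_sample_alt (l ++ "|" :: r) =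
      (pvChk l 0 && (pvChk r l.length &&
        (((0 : Int) < (l.length : Int) &&
          ((l.length : Int) < ((l ++ "|" :: r).length : Int) - 1)) &&
          ((l.length + r.length) % 2 == 0)))) := by
  unfold is_valid_sample_alt
  rw [pvBGo_free _ l ("|" :: r) hl 0 0 0 (-1)]
  simp only [zero_add]
  congr 1
  simp only [pvBGo]
  rw [if_pos (by simp)]
  have hfree := pvBGo_free ((l ++ "|" :: r).length : Int) r [] hr
    ((l.length : Int) + 1) l.length 1 (l.length : Int)
  rw [List.append_nil] at hfree
  rw [hfree]
  congr 1

-- ===== VERDICT (by name: the statement is the Claim_ definition above) =====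
theorem is_valid_sample_spec : Claim_equal_is_valid_sample := by
  intro tokens _
  unfold Spec_is_valid_sample is_valid_sample
  rw [PySem.List.count_eq]
  by_cases hc : List.count "|" tokens = 1
  · obtain ⟨l, r, hsplit, hl, hr⟩ := count_eq_one_split tokens hc
    subst hsplit
    rw [if_neg (by simp [hc])]
    rw [(PySem.List.index?_eq_some_iff (l ++ "|" :: r) "|" l.length).mpr ⟨l, r, rfl, rfl, hl⟩]
    dsimp only
    rw [pvB_eval l r hl hr]
    have hlen : (l ++ "|" :: r).length = l.length + 1 + r.length := by
      simp [List.length_append, List.length_cons]; omega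
    by_cases hl0 : l = []
    · subst hl0
      simp [pvChk]
    · by_cases hr0 : r = []
      · subst hr0
        rw [if_pos (Or.inr (by rw [hlen]; simp))]
        simp
      · have hlpos : 0 < l.length := List.length_pos_iff.mpr hl0
        have hrpos : 0 < r.length := List.length_pos_iff.mpr hr0
        rw [if_neg (by rw [hlen]; omega)]
        have hsl1 : PySem.List.slice (l ++ "|" :: r) none (some ((l.length : Nat) : Int)) = l := by
          rw [PySem.List.slice_to _ (by positivity)]
          simpa using List.take_left l ("|" :: r)
        have hsl2 : PySem.List.slice (l ++ "|" :: r) (some (((l.length : Nat) : Int) + 1)) none = r := by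
          rw [PySem.List.slice_from _ (by positivity)]
          have : (((l.length : Int) + 1)).toNat = (l ++ ["|"]).length := by
            simp only [List.length_append, List.length_cons, List.length_nil]; omega
          rw [this]
          have : l ++ "|" :: r = (l ++ ["|"]) ++ r := by simp
          rw [this, List.drop_left]
        simp only [hsl1, hsl2]
        have hplen : (l ++ r).length = l.length + r.length := List.length_append ..
        by_cases hpar : (l.length + r.length) % 2 = 0
        · rw [if_neg (by rw [hplen]; omega)]
          have hA : pvALoop (l ++ r) (PySem.List.pyRange 0 ((l ++ r).length : Int) 2) =
              pvPairChk (l ++ r) := by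
            have h0 := pvALoop_eq (l ++ r) (by rw [hplen]; omega) []
            simpa using h0
          rw [hA, ← pvChk_even (l ++ r) (by rw [hplen]; omega) 0 rfl,
            pvChk_append l r 0, Nat.zero_add]
          have c2 : (l.length : Int) < (l.length : Int) + ((r.length : Int) + 1) - 1 := by
            omega
          have c3 : ((l.length + r.length) % 2 == 0) = true := by simpa using hpar
          simp [hlpos, c2, c3]
        · rw [if_pos (by rw [hplen]; omega)]
          have c3 : ((l.length + r.length) % 2 == 0) = false := by simpa using hpar
          simp [c3]
  · rw [if_pos (by simpa using hc)]
    unfold is_valid_sample_alt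
    rw [pvBGo_seps_ne _ _ _ _ _ _ (by simpa using hc)]
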